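-- pv_equiv track=rewrite | github.com/dyssl/jieduizuoye | AutoPlayForShisanshui/CommonCardsType.py | FindZhadan
-- ===== SOURCE A (Python) =====
-- def GetList_count(Cardlist=[]):
--     list_count = [0, 0, 0, 0, 0, 0, 0, 0, 0, 0, 0, 0, 0, 0, 0]
--     for item in Cardlist:
--         number = item[0]
--         list_count[number] = list_count[number] + 1
--     return list_count
--
-- def FindZhadan(Cardlist=[]):
--     Zhadan = []  # 最后返回的列表
--     temp_Zhadan = []  # 存储一个临时炸弹
--     list_count = GetList_count(Cardlist)
--     for i in range(len(list_count)):
--         if (list_count[i] == 4):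
--             for item in Cardlist:
--                 if (item[0] == i):
--                     temp_Zhadan.append(item)
--             Zhadan.append(temp_Zhadan)
--             temp_Zhadan = []
--     return Zhadan
-- ===== SOURCE B (Python) =====
-- def FindZhadan(Cardlist=[]):
--     buckets = [[] for _ in range(15)]
--     for item in Cardlist:
--         buckets[item[0]].append(item)
--     return [b for b in buckets if len(b) == 4]
-- ===== Notes on version B (the rewrite author's own statement) =====
-- stated objective: simpler
-- what changed: Group cards into 15 buckets in one pass and keep the buckets of size 4, instead of building a count array and then rescanning the whole card list once per four-of-a-kind.
-- intended difference: When a mod-15 class of card numbers has exactly four cards including a negative number, A's wrapped count says bomb but its equality rescan drops the negative cards (returning e.g. an empty group), while B returns all four cards of that bucket, the intended four-of-a-kind. — e.g. on FindZhadan([(-1, 1), (-1, 1), (-1, 1), (-1, 1)]): A returns [[]], B returns [[(-1, 1), (-1, 1), (-1, 1), (-1, 1)]]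
import Mathlib
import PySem

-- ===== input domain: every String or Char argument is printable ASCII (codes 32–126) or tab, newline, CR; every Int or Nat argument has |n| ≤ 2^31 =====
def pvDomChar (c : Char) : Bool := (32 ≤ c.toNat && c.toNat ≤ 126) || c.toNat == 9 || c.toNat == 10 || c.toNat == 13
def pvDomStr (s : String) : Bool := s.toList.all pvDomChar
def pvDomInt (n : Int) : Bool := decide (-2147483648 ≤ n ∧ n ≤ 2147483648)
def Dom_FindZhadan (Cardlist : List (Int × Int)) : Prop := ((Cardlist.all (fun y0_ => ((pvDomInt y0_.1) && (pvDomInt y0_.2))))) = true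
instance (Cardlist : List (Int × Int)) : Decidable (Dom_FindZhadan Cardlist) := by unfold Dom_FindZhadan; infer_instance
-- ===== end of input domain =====

-- B groups cards into 15 buckets in ONE pass and keeps the size-4 buckets, instead of
-- A's count array followed by a rescan of the whole card list for every bomb (simpler).

-- ===== PORT A =====
-- list_count[number] = list_count[number] + 1 : read + write at the same index;
-- pyGetD/pySetD are exact wherever Python does not raise (indices in [-len, len), which
-- Pre_ guarantees; Python's negative-index rule is ported exactly).
def GetList_count (Cardlist : List (Int × Int)) : List Int :=
  Cardlist.foldl
    (fun lc item =>
      PySem.List.pySetD lc item.1 (PySem.List.pyGetD lc item.1 0 + 1))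
    [0, 0, 0, 0, 0, 0, 0, 0, 0, 0, 0, 0, 0, 0, 0]

def FindZhadan (Cardlist : List (Int × Int)) : List (List (Int × Int)) :=
  let list_count := GetList_count Cardlist
  let st :=
    (List.range list_count.length).foldl
      (fun (st : List (List (Int × Int)) × List (Int × Int)) (i : Nat) =>
        if PySem.List.pyGetD list_count (i : Int) 0 == 4 then
          let temp :=
            Cardlist.foldl
              (fun t item => if item.1 == (i : Int) then t ++ [item] else t) st.2
          (st.1 ++ [temp], [])
        else st)
      ([], [])
  st.1

-- ===== PORT B =====
-- buckets[item[0]].append(item) : read + write of the bucket at the same index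
-- (Python's negative-index rule again ported exactly by pyGetD/pySetD).
def FindZhadan_alt (Cardlist : List (Int × Int)) : List (List (Int × Int)) :=
  let buckets :=
    Cardlist.foldl
      (fun bs item =>
        PySem.List.pySetD bs item.1 (PySem.List.pyGetD bs item.1 [] ++ [item]))
      (List.replicate 15 [])
  buckets.filter (fun b => b.length == 4)

-- ===== PRECONDITION & SPEC =====
-- Pre_ is exactly the inputs on which A returns: a card number ≥ 15 or < -15 makes A
-- (and B) raise IndexError.
def Pre_FindZhadan (Cardlist : List (Int × Int)) : Prop :=
  ∀ c ∈ Cardlist, -15 ≤ c.1 ∧ c.1 < 15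
instance (Cardlist : List (Int × Int)) : Decidable (Pre_FindZhadan Cardlist) := by
  unfold Pre_FindZhadan; infer_instance

def pvWitness_FindZhadan : (List (Int × Int)) :=
  [(3, 0), (3, 1), (3, 2), (3, 3), (5, 0), (5, 1)]

-- On inputs where some mod-15 class of card numbers has exactly four cards and contains a
-- negative number, A's count (taken at the Python-wrapped index) says "bomb" but its rescan
-- compares numbers by equality, so A returns a group missing the negative cards (e.g. an
-- empty group), while B returns all four cards of the bucket — the intended four-of-a-kind.
def D_FindZhadan (Cardlist : List (Int × Int)) : Prop :=
  ∃ i : Nat, i < 15 ∧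
    (Cardlist.filter (fun c => c.1 % 15 == (i : Int))).length = 4 ∧
    ∃ c ∈ Cardlist, c.1 < 0 ∧ c.1 % 15 = (i : Int)
instance (Cardlist : List (Int × Int)) : Decidable (D_FindZhadan Cardlist) := by
  unfold D_FindZhadan; infer_instance

def Spec_FindZhadan (Cardlist : List (Int × Int)) (out : List (List (Int × Int))) : Prop :=
  ¬ D_FindZhadan Cardlist → out = FindZhadan_alt Cardlist
instance (Cardlist : List (Int × Int)) (out : List (List (Int × Int))) : Decidable (Spec_FindZhadan Cardlist out) := by unfold Spec_FindZhadan; infer_instance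

def pvDiffWitness_FindZhadan : (List (Int × Int)) :=
  [(-1, 1), (-1, 1), (-1, 1), (-1, 1)]

def pvDiffWitnessOut_FindZhadan : (List (List (Int × Int))) × (List (List (Int × Int))) :=
  ([[]], [[(-1, 1), (-1, 1), (-1, 1), (-1, 1)]])

-- ===== CLAIM (what is proved, stated in full; the proofs are below) =====
def Claim_unchanged_FindZhadan : Prop := ∀ (Cardlist : List (Int × Int)), Dom_FindZhadan Cardlist → Pre_FindZhadan Cardlist → Spec_FindZhadan Cardlist (FindZhadan Cardlist)
def Claim_changed_FindZhadan : Prop := Dom_FindZhadan (pvDiffWitness_FindZhadan) ∧ Pre_FindZhadan (pvDiffWitness_FindZhadan) ∧ D_FindZhadan (pvDiffWitness_FindZhadan) ∧ FindZhadan (pvDiffWitness_FindZhadan) = pvDiffWitnessOut_FindZhadan.1 ∧ FindZhadan_alt (pvDiffWitness_FindZhadan) = pvDiffWitnessOut_FindZhadan.2 ∧ pvDiffWitnessOut_FindZhadan.1 ≠ pvDiffWitnessOut_FindZhadan.2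
def Claim_exact_FindZhadan : Prop := ∀ (Cardlist : List (Int × Int)), Dom_FindZhadan Cardlist → Pre_FindZhadan Cardlist → D_FindZhadan Cardlist → FindZhadan Cardlist ≠ FindZhadan_alt Cardlist

-- ===== LEMMAS AND PROOFS =====

-- the class of cards whose number falls (after Python's negative-index wrap) in cell i,
-- and the cards A's rescan actually collects for cell i
def pvCls (L : List (Int × Int)) (i : Nat) : List (Int × Int) :=
  L.filter (fun c => c.1 % 15 == (i : Int))
def pvEqGrp (L : List (Int × Int)) (i : Nat) : List (Int × Int) :=
  L.filter (fun c => c.1 == (i : Int))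

-- Python's l[i] = v / l[i] for -len ≤ i < len = 15, as a set/get at the wrapped index
theorem pv_setD_wrap {α : Type} (xs : List α) (i : Int) (v : α)
    (hlen : xs.length = 15) (h1 : -15 ≤ i) (h2 : i < 15) :
    PySem.List.pySetD xs i v = xs.set (i % 15).toNat v := by
  unfold PySem.List.pySetD PySem.List.pySet? PySem.List.pyIdx?
  rw [hlen]
  by_cases h0 : 0 ≤ i
  · rw [if_pos h0, if_pos (by omega)]
    have : i.toNat = (i % 15).toNat := by omega
    simp [this]
  · rw [if_neg h0, if_pos (by omega)]
    have : 15 - (-i).toNat = (i % 15).toNat := by omega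
    simp [this]

theorem pv_getD_wrap {α : Type} (xs : List α) (i : Int) (d : α)
    (hlen : xs.length = 15) (h1 : -15 ≤ i) (h2 : i < 15) :
    PySem.List.pyGetD xs i d = xs.getD (i % 15).toNat d := by
  by_cases h0 : 0 ≤ i
  · rw [PySem.List.pyGetD_eq_getElem xs d h0 (by omega)]
    have hk : (i % 15).toNat = i.toNat := by omega
    rw [hk, List.getD_eq_getElem xs d (by omega)]
  · have hk : -((-i).toNat : Int) = i := by omega
    have hg := PySem.List.pyGetD_neg_natCast xs (-i).toNat d (by omega) (by omega)
    rw [hk] at hg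
    rw [hg, List.getD_eq_getElem xs d (by omega)]
    congr 1
    omega

-- setting index k of a mapped range rewrites the function at k
theorem pv_map_range_set {α : Type} (n k : Nat) (g : Nat → α) (v : α) :
    ((List.range n).map g).set k v = (List.range n).map (fun i => if i = k then v else g i) := by
  apply List.ext_getElem
  · simp
  · intro i h1 h2
    simp only [List.getElem_set, List.getElem_map, List.getElem_range]
    simp only [List.length_set, List.length_map, List.length_range] at h1
    split_ifs with h h' h'
    · rfl
    · omega
    · omega
    · rfl

theorem pv_getD_map_range {α : Type} (n k : Nat) (g : Nat → α) (d : α) (hk : k < n) :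
    ((List.range n).map g).getD k d = g k := by
  rw [List.getD_eq_getElem _ _ (by simpa using hk)]
  simp

-- the generic one-pass "update the cell at the card's (wrapped) number" loop,
-- characterised per cell
theorem pv_foldSet {α : Type} (L : List (Int × Int)) (g : Nat → α) (upd : α → (Int × Int) → α) (d : α)
    (h : ∀ c ∈ L, -15 ≤ c.1 ∧ c.1 < 15) :
    L.foldl (fun st c => PySem.List.pySetD st c.1 (upd (PySem.List.pyGetD st c.1 d) c))
      ((List.range 15).map g)
    = (List.range 15).map (fun (i : Nat) => (pvCls L i).foldl upd (g i)) := by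
  induction L generalizing g with
  | nil => simp [pvCls]
  | cons c L ih =>
    obtain ⟨h1, h2⟩ := h c List.mem_cons_self
    have hklt : (c.1 % 15).toNat < 15 := by omega
    have hkc : c.1 % 15 = (((c.1 % 15).toNat : Nat) : Int) := by omega
    simp only [List.foldl_cons]
    rw [pv_setD_wrap _ _ _ (by simp) h1 h2, pv_getD_wrap _ _ _ (by simp) h1 h2,
        pv_getD_map_range 15 (c.1 % 15).toNat g d hklt, pv_map_range_set 15 (c.1 % 15).toNat g,
        ih _ (fun x hx => h x (List.mem_cons_of_mem _ hx))]
    apply List.map_congr_left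
    intro i hi
    simp only [pvCls, List.filter_cons]
    by_cases hci : i = (c.1 % 15).toNat
    · subst hci
      have hpos : (c.1 % 15 == (((c.1 % 15).toNat : Nat) : Int)) = true := by
        rw [beq_iff_eq]; omega
      rw [if_pos rfl, if_pos hpos, List.foldl_cons]
    · have hneg : ¬ ((c.1 % 15 == ((i : Nat) : Int)) = true) := by
        rw [beq_iff_eq]; omega
      rw [if_neg hci, if_neg hneg]

theorem pv_foldl_len {α : Type} (L : List α) (a : Int) :
    L.foldl (fun x (_ : α) => x + 1) a = a + L.length := by
  induction L generalizing a with
  | nil => simp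
  | cons c L ih => simp [ih]; omega

-- A's count array, per cell: the size of the wrapped class
theorem pv_count_eq (L : List (Int × Int)) (h : ∀ c ∈ L, -15 ≤ c.1 ∧ c.1 < 15) :
    GetList_count L = (List.range 15).map (fun (i : Nat) => ((pvCls L i).length : Int)) := by
  unfold GetList_count
  have hinit : ([0, 0, 0, 0, 0, 0, 0, 0, 0, 0, 0, 0, 0, 0, 0] : List Int)
      = (List.range 15).map (fun _ => (0 : Int)) := by decide
  rw [hinit, pv_foldSet L (fun _ => (0 : Int)) (fun x _ => x + 1) 0 h]
  apply List.map_congr_left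
  intro i _
  rw [pv_foldl_len]
  simp

-- B's buckets, per cell: the wrapped class itself
theorem pv_buckets_eq (L : List (Int × Int)) (h : ∀ c ∈ L, -15 ≤ c.1 ∧ c.1 < 15) :
    L.foldl (fun bs item =>
        PySem.List.pySetD bs item.1 (PySem.List.pyGetD bs item.1 [] ++ [item]))
      (List.replicate 15 [])
    = (List.range 15).map (pvCls L) := by
  have hinit : (List.replicate 15 ([] : List (Int × Int)))
      = (List.range 15).map (fun _ => ([] : List (Int × Int))) := by decide
  rw [hinit, pv_foldSet L (fun _ => ([] : List (Int × Int))) (fun t c => t ++ [c]) [] h]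
  apply List.map_congr_left
  intro i _
  rw [PySem.List.foldl_append_singleton_eq_self]
  simp

-- A's outer loop over range(15), accumulated form: for each cell whose wrapped class has
-- size 4, A appends the cards equal to the cell index
theorem pv_outer (L : List (Int × Int)) (lc : List Int)
    (hlc : lc = (List.range 15).map (fun (i : Nat) => ((pvCls L i).length : Int)))
    (n : Nat) (hn : n ≤ 15) (Z : List (List (Int × Int))) :
    (List.range n).foldl
      (fun (st : List (List (Int × Int)) × List (Int × Int)) (i : Nat) =>
        if PySem.List.pyGetD lc (i : Int) 0 == 4 then
          (st.1 ++ [L.foldl (fun t item => if item.1 == (i : Int) then t ++ [item] else t) st.2], [])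
        else st)
      (Z, [])
    = (Z ++ ((List.range n).filter (fun i => (pvCls L i).length == 4)).map (pvEqGrp L), []) := by
  induction n generalizing Z with
  | zero => simp
  | succ n ih =>
    rw [List.range_succ, List.foldl_append, ih (by omega)]
    simp only [List.foldl_cons, List.foldl_nil, List.filter_append, List.filter_cons,
      List.filter_nil, List.map_append]
    have hget : PySem.List.pyGetD lc ((n : Nat) : Int) 0 = ((pvCls L n).length : Int) := by
      rw [hlc, PySem.List.pyGetD_natCast, pv_getD_map_range 15 n _ 0 (by omega)]
    have hbeq : (PySem.List.pyGetD lc ((n : Nat) : Int) 0 == 4) = ((pvCls L n).length == 4) := by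
      rw [hget]
      by_cases hlen : (pvCls L n).length = 4
      · simp [hlen]
      · have : ¬ (((pvCls L n).length : Int) = 4) := by omega
        simp [hlen, this]
    rw [hbeq, PySem.List.foldl_append_if_eq_filter]
    by_cases hlen : (pvCls L n).length = 4
    · simp [hlen, pvEqGrp]
    · simp [hlen]

-- both results in the same "filter the cells, then map" form
theorem pv_a_shape (L : List (Int × Int)) (h : ∀ c ∈ L, -15 ≤ c.1 ∧ c.1 < 15) :
    FindZhadan L
    = ((List.range 15).filter (fun i => (pvCls L i).length == 4)).map (pvEqGrp L) := by
  have hlc := pv_count_eq L h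
  have hlen : (GetList_count L).length = 15 := by rw [hlc]; simp
  unfold FindZhadan
  simp only [hlen]
  rw [pv_outer L (GetList_count L) hlc 15 le_rfl []]
  simp

theorem pv_b_shape (L : List (Int × Int)) (h : ∀ c ∈ L, -15 ≤ c.1 ∧ c.1 < 15) :
    FindZhadan_alt L
    = ((List.range 15).filter (fun i => (pvCls L i).length == 4)).map (pvCls L) := by
  unfold FindZhadan_alt
  simp only [pv_buckets_eq L h]
  rw [List.filter_map]
  rfl

-- ===== VERDICT (by name: the statement is the Claim_ definition above) =====
theorem FindZhadan_spec : Claim_unchanged_FindZhadan := by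
  intro L _ hpre
  unfold Spec_FindZhadan
  intro hD
  rw [pv_a_shape L hpre, pv_b_shape L hpre]
  apply List.map_congr_left
  intro i hi
  rw [List.mem_filter] at hi
  obtain ⟨hir, hcnt⟩ := hi
  rw [List.mem_range] at hir
  rw [beq_iff_eq] at hcnt
  unfold pvEqGrp pvCls
  apply List.filter_congr
  intro c hc
  by_cases hneg : c.1 < 0
  · have hne : ¬ (c.1 % 15 = ((i : Nat) : Int)) := by
      intro hmod
      exact hD ⟨i, hir, hcnt, c, hc, hneg, hmod⟩
    have h1 : (c.1 == ((i : Nat) : Int)) = false := by rw [beq_eq_false_iff_ne]; omega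
    have h2 : (c.1 % 15 == ((i : Nat) : Int)) = false := by rw [beq_eq_false_iff_ne]; exact hne
    rw [h1, h2]
  · obtain ⟨hl, hr⟩ := hpre c hc
    have : c.1 % 15 = c.1 := by omega
    rw [this]

theorem FindZhadan_changed : Claim_changed_FindZhadan := by
  unfold Claim_changed_FindZhadan; decide

theorem FindZhadan_tight : Claim_exact_FindZhadan := by
  intro L _ hpre hD heq
  obtain ⟨i, hir, hcnt, c, hc, hneg, hmod⟩ := hD
  rw [pv_a_shape L hpre, pv_b_shape L hpre] at heq
  have hmem : i ∈ (List.range 15).filter (fun i => (pvCls L i).length == 4) := by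
    rw [List.mem_filter, List.mem_range]
    exact ⟨hir, by rw [beq_iff_eq]; exact hcnt⟩
  have hpt : pvEqGrp L i = pvCls L i := by
    have := List.map_inj_left.mp heq i hmem
    exact this
  have hcin : c ∈ pvCls L i := by
    unfold pvCls
    rw [List.mem_filter]
    exact ⟨hc, by rw [beq_iff_eq]; exact hmod⟩
  rw [← hpt] at hcin
  unfold pvEqGrp at hcin
  rw [List.mem_filter, beq_iff_eq] at hcin
  omega
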